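-- pv_equiv track=rewrite | github.com/carlobb23/non_model | setup.py | get_unique_combinations_and_list_with_dicts
-- ===== SOURCE A (Python) =====
-- def get_unique_combinations_and_list_with_dicts(R_p, Entry_p):
--     combined = [(R_p[p], Entry_p[p]) for p in R_p.keys()]
--
--     unique_combinations = {}
--     for p, combo in enumerate(combined, start=1):
--         if combo not in unique_combinations:
--             unique_combinations[combo] = []
--         unique_combinations[combo].append(p)
--
--     num_unique_combinations = len(unique_combinations)
--
--     N_c = list(range(1, num_unique_combinations + 1))
--
--     R_p_c = {}
--     Entry_p_c = {}
--     Profile_patient_count = {}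
--     for idx, (combo, patients) in enumerate(unique_combinations.items(), start=1):
--         R_p_c[idx] = combo[0]
--         Entry_p_c[idx] = combo[1]
--         Profile_patient_count[idx] = len(patients)
--
--     return N_c, R_p_c, Entry_p_c
-- ===== SOURCE B (Python) =====
-- def get_unique_combinations_and_list_with_dicts(R_p, Entry_p):
--     # single pass: first-seen combos get consecutive indices starting at 1
--     seen = set()
--     count = 0
--     R_p_c = {}
--     Entry_p_c = {}
--     for p in R_p:
--         combo = (R_p[p], Entry_p[p])
--         if combo not in seen:
--             seen.add(combo)
--             count += 1
--             R_p_c[count] = combo[0]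
--             Entry_p_c[count] = combo[1]
--     return list(range(1, count + 1)), R_p_c, Entry_p_c
-- ===== Notes on version B (the rewrite author's own statement) =====
-- stated objective: simpler
-- what changed: Replaces A's two sequential passes (group patients into a dict-of-lists keyed by combo, then re-enumerate its items into three dicts, two of them discarded work) by one pass over the keys with a seen-set and a counter that assigns first-seen indices directly, dropping the patient-list grouping and Profile_patient_count entirely.
import Mathlib
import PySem

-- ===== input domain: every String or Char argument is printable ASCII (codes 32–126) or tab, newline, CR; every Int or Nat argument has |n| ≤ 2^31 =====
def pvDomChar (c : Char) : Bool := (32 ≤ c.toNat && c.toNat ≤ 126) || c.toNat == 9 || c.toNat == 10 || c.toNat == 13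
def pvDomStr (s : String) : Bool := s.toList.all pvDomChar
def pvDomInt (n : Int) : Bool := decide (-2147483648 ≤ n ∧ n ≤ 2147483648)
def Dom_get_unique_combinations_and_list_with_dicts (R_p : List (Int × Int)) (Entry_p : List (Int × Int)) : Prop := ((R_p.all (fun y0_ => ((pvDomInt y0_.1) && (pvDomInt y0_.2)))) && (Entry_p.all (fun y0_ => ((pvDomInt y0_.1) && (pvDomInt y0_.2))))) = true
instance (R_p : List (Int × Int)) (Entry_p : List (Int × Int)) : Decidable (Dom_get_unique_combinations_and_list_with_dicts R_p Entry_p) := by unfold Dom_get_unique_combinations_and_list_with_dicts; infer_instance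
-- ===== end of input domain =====

-- B replaces A's two sequential passes (group into a dict-of-lists, then re-enumerate its
-- items into three dicts, two of which are dead work) by one pass with a seen-set and a
-- counter assigning first-seen indices directly: simpler, same result.

-- ===== PORT A =====
-- body of A's first loop: 'if combo not in unique_combinations: …[combo] = []; …[combo].append(p)'
def pvStepA (d : PySem.Dict (Int × Int) (List Int)) (pc : Int × (Int × Int)) : PySem.Dict (Int × Int) (List Int) :=
  let d' := if d.contains pc.2 then d else d.insert pc.2 ([] : List Int)
  d'.modify pc.2 [] (fun l => l ++ [pc.1])

-- body of A's second loop: 'R_p_c[idx] = combo[0]; Entry_p_c[idx] = combo[1]; Profile_patient_count[idx] = len(patients)'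
def pvStepA2 (st : PySem.Dict Int Int × PySem.Dict Int Int × PySem.Dict Int Int)
    (ip : Int × ((Int × Int) × List Int)) : PySem.Dict Int Int × PySem.Dict Int Int × PySem.Dict Int Int :=
  (st.1.insert ip.1 ip.2.1.1, st.2.1.insert ip.1 ip.2.1.2, st.2.2.insert ip.1 (ip.2.2.length : Int))

-- 'Entry_p[p]' is ported as getD with default 0; Pre_ guarantees the key is present (Python raises KeyError otherwise)
def get_unique_combinations_and_list_with_dicts (R_p : List (Int × Int)) (Entry_p : List (Int × Int)) : List Int × (List (Int × Int)) × (List (Int × Int)) :=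
  let dR := PySem.Dict.ofList R_p
  let dE := PySem.Dict.ofList Entry_p
  let combined := dR.keys.map (fun p => (dR.getD p 0, dE.getD p 0))
  let uc := (PySem.List.enumerate combined 1).foldl pvStepA PySem.Dict.empty
  let num : Int := (uc.size : Int)
  let N_c := PySem.List.pyRange 1 (num + 1) 1
  let tr := (PySem.List.enumerate uc.items 1).foldl pvStepA2
      ((PySem.Dict.empty : PySem.Dict Int Int), (PySem.Dict.empty : PySem.Dict Int Int), (PySem.Dict.empty : PySem.Dict Int Int))
  (N_c, tr.1.items, tr.2.1.items)

-- ===== PORT B =====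
-- body of B's single loop, on the already-computed combo
def pvStepB (st : PySem.Set (Int × Int) × Int × PySem.Dict Int Int × PySem.Dict Int Int)
    (combo : Int × Int) : PySem.Set (Int × Int) × Int × PySem.Dict Int Int × PySem.Dict Int Int :=
  if PySem.Set.contains st.1 combo then st
  else (PySem.Set.add st.1 combo, st.2.1 + 1,
        st.2.2.1.insert (st.2.1 + 1) combo.1, st.2.2.2.insert (st.2.1 + 1) combo.2)

def get_unique_combinations_and_list_with_dicts_alt (R_p : List (Int × Int)) (Entry_p : List (Int × Int)) : List Int × (List (Int × Int)) × (List (Int × Int)) :=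
  let dR := PySem.Dict.ofList R_p
  let dE := PySem.Dict.ofList Entry_p
  let st := dR.keys.foldl (fun st p => pvStepB st (dR.getD p 0, dE.getD p 0))
      ((PySem.Set.empty : PySem.Set (Int × Int)), (0 : Int),
       (PySem.Dict.empty : PySem.Dict Int Int), (PySem.Dict.empty : PySem.Dict Int Int))
  (PySem.List.pyRange 1 (st.2.1 + 1) 1, st.2.2.1.items, st.2.2.2.items)

-- ===== PRECONDITION & SPEC =====
-- Pre_ excludes exactly the inputs on which Python A raises KeyError: a key of R_p missing from Entry_p.
def Pre_get_unique_combinations_and_list_with_dicts (R_p : List (Int × Int)) (Entry_p : List (Int × Int)) : Prop :=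
  (R_p.all (fun q => Entry_p.any (fun e => e.1 == q.1))) = true
instance (R_p : List (Int × Int)) (Entry_p : List (Int × Int)) : Decidable (Pre_get_unique_combinations_and_list_with_dicts R_p Entry_p) := by unfold Pre_get_unique_combinations_and_list_with_dicts; infer_instance

def pvWitness_get_unique_combinations_and_list_with_dicts : (List (Int × Int)) × (List (Int × Int)) := ([(1, 2), (3, 2), (4, 2)], [(1, 5), (3, 6), (4, 5)])

def Spec_get_unique_combinations_and_list_with_dicts (R_p : List (Int × Int)) (Entry_p : List (Int × Int)) (out : List Int × (List (Int × Int)) × (List (Int × Int))) : Prop := out = get_unique_combinations_and_list_with_dicts_alt R_p Entry_p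
instance (R_p : List (Int × Int)) (Entry_p : List (Int × Int)) (out : List Int × (List (Int × Int)) × (List (Int × Int))) : Decidable (Spec_get_unique_combinations_and_list_with_dicts R_p Entry_p out) := by unfold Spec_get_unique_combinations_and_list_with_dicts; infer_instance

-- ===== CLAIM (what is proved, stated in full; the proofs are below) =====
def Claim_equal_get_unique_combinations_and_list_with_dicts : Prop := ∀ (R_p : List (Int × Int)) (Entry_p : List (Int × Int)), Dom_get_unique_combinations_and_list_with_dicts R_p Entry_p → Pre_get_unique_combinations_and_list_with_dicts R_p Entry_p → Spec_get_unique_combinations_and_list_with_dicts R_p Entry_p (get_unique_combinations_and_list_with_dicts R_p Entry_p)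

-- ===== LEMMAS AND PROOFS =====

-- enumerate commutes with map
theorem pv_enumerate_map {α β : Type} (g : α → β) (l : List α) (s : Int) :
    PySem.List.enumerate (l.map g) s = (PySem.List.enumerate l s).map (fun p => (p.1, g p.2)) := by
  induction l generalizing s with
  | nil => simp [PySem.List.enumerate_nil]
  | cons x xs ih => simp [PySem.List.enumerate_cons, ih]

-- keys after one step of A's grouping loop
theorem pv_keys_stepA (d : PySem.Dict (Int × Int) (List Int)) (pc : Int × (Int × Int)) :
    (pvStepA d pc).keys = PySem.Set.add d.keys pc.2 := by
  by_cases h : d.contains pc.2 = true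
  · simp only [pvStepA, h, if_pos]
    rw [PySem.Dict.keys_modify, PySem.Dict.keys_insert_of_contains _ _ h,
      PySem.Set.add_eq_ite, if_pos ((PySem.Dict.contains_iff_mem_keys d pc.2).mp h)]
  · have h' : d.contains pc.2 = false := by simpa using h
    simp only [pvStepA, h', Bool.false_eq_true, ite_false]
    rw [PySem.Dict.keys_modify,
      PySem.Dict.keys_insert_of_contains _ _ (PySem.Dict.contains_insert_self d pc.2 _),
      PySem.Dict.keys_insert_of_not_contains _ _ h', PySem.Set.add_eq_ite,
      if_neg (fun hm => by simp [(PySem.Dict.contains_iff_mem_keys d pc.2).mpr hm] at h')]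

-- keys after A's whole grouping loop
theorem pv_keys_foldA (l : List (Int × (Int × Int))) (d : PySem.Dict (Int × Int) (List Int)) :
    (l.foldl pvStepA d).keys = PySem.Set.update d.keys (l.map (·.2)) := by
  induction l generalizing d with
  | nil => simp [PySem.Set.update]
  | cons x xs ih => simp [List.foldl_cons, ih, pv_keys_stepA, PySem.Set.update_cons]

-- A's second loop over fresh consecutive indices appends to the items lists
theorem pv_foldA2 (l : List ((Int × Int) × List Int)) (i : Int)
    (d1 d2 d3 : PySem.Dict Int Int)
    (h1 : ∀ j : Int, i ≤ j → d1.contains j = false)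
    (h2 : ∀ j : Int, i ≤ j → d2.contains j = false) :
    ((PySem.List.enumerate l i).foldl pvStepA2 (d1, d2, d3)).1.items
        = d1.items ++ (PySem.List.enumerate l i).map (fun ip => (ip.1, ip.2.1.1))
    ∧ ((PySem.List.enumerate l i).foldl pvStepA2 (d1, d2, d3)).2.1.items
        = d2.items ++ (PySem.List.enumerate l i).map (fun ip => (ip.1, ip.2.1.2)) := by
  induction l generalizing i d1 d2 d3 with
  | nil => simp [PySem.List.enumerate_nil]
  | cons x xs ih =>
    have hc1 : d1.contains i = false := h1 i le_rfl
    have hc2 : d2.contains i = false := h2 i le_rfl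
    have h1' : ∀ j : Int, i + 1 ≤ j → (d1.insert i x.1.1).contains j = false := by
      intro j hj
      rw [PySem.Dict.contains_insert]
      have : (j == i) = false := by simp; omega
      simp [this, h1 j (by omega)]
    have h2' : ∀ j : Int, i + 1 ≤ j → (d2.insert i x.1.2).contains j = false := by
      intro j hj
      rw [PySem.Dict.contains_insert]
      have : (j == i) = false := by simp; omega
      simp [this, h2 j (by omega)]
    have := ih (i + 1) (d1.insert i x.1.1) (d2.insert i x.1.2) (d3.insert i (x.2.length : Int)) h1' h2'
    simp only [PySem.List.enumerate_cons, List.foldl_cons, pvStepA2] at *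
    rw [this.1, this.2, PySem.Dict.items_insert_of_not_contains _ _ hc1,
      PySem.Dict.items_insert_of_not_contains _ _ hc2]
    simp

-- B's single pass, characterised
theorem pv_foldB (f : Int → Int × Int) (ks : List Int) :
    (ks.foldl (fun st p => pvStepB st (f p))
      ((PySem.Set.empty : PySem.Set (Int × Int)), (0 : Int),
       (PySem.Dict.empty : PySem.Dict Int Int), (PySem.Dict.empty : PySem.Dict Int Int))).1
        = PySem.Set.ofList (ks.map f)
    ∧ (ks.foldl (fun st p => pvStepB st (f p)) (PySem.Set.empty, 0, PySem.Dict.empty, PySem.Dict.empty)).2.1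
        = ((PySem.Set.ofList (ks.map f)).length : Int)
    ∧ (ks.foldl (fun st p => pvStepB st (f p)) (PySem.Set.empty, 0, PySem.Dict.empty, PySem.Dict.empty)).2.2.1.items
        = (PySem.List.enumerate (PySem.Set.ofList (ks.map f)) 1).map (fun p => (p.1, p.2.1))
    ∧ (ks.foldl (fun st p => pvStepB st (f p)) (PySem.Set.empty, 0, PySem.Dict.empty, PySem.Dict.empty)).2.2.2.items
        = (PySem.List.enumerate (PySem.Set.ofList (ks.map f)) 1).map (fun p => (p.1, p.2.2)) := by
  induction ks using List.reverseRecOn with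
  | nil => simp [PySem.List.enumerate_nil, PySem.Set.empty, PySem.Set.ofList, PySem.Dict.empty]
  | append_singleton ks k ih =>
    obtain ⟨ih1, ih2, ih3, ih4⟩ := ih
    simp only [List.map_append, List.map_cons, List.map_nil, List.foldl_append,
      List.foldl_cons, List.foldl_nil, PySem.Set.ofList_append_singleton]
    set st := ks.foldl (fun st p => pvStepB st (f p))
      ((PySem.Set.empty : PySem.Set (Int × Int)), (0 : Int),
       (PySem.Dict.empty : PySem.Dict Int Int), (PySem.Dict.empty : PySem.Dict Int Int)) with hst
    by_cases hm : f k ∈ PySem.Set.ofList (ks.map f)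
    · have hcon : PySem.Set.contains st.1 (f k) = true := by
        rw [ih1]; exact (PySem.Set.contains_iff _ _).mpr hm
      rw [PySem.Set.add_eq_ite, if_pos hm]
      simp only [pvStepB, hcon, if_pos]
      exact ⟨ih1, ih2, ih3, ih4⟩
    · have hcon : PySem.Set.contains st.1 (f k) = true → False := by
        rw [ih1]; intro h; exact hm ((PySem.Set.contains_iff _ _).mp h)
      have hcon' : PySem.Set.contains st.1 (f k) = false := by
        cases h : PySem.Set.contains st.1 (f k)
        · rfl
        · exact absurd h hcon
      have hadd : (PySem.Set.ofList (ks.map f)).add (f k) = PySem.Set.ofList (ks.map f) ++ [f k] :=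
        PySem.Set.add_of_not_mem hm
      have hlen : ((PySem.Set.ofList (ks.map f)).add (f k)).length
          = (PySem.Set.ofList (ks.map f)).length + 1 := by
        rw [hadd]; simp
      have hkeys1 : st.2.2.1.keys
          = PySem.List.pyRange 1 (1 + ((PySem.Set.ofList (ks.map f)).length : Int)) 1 := by
        show st.2.2.1.items.map (·.1) = _
        rw [ih3, List.map_map]
        simp [Function.comp_def, PySem.List.map_fst_enumerate]
      have hkeys2 : st.2.2.2.keys
          = PySem.List.pyRange 1 (1 + ((PySem.Set.ofList (ks.map f)).length : Int)) 1 := by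
        show st.2.2.2.items.map (·.1) = _
        rw [ih4, List.map_map]
        simp [Function.comp_def, PySem.List.map_fst_enumerate]
      have hfresh : ∀ d : PySem.Dict Int Int,
          d.keys = PySem.List.pyRange 1 (1 + ((PySem.Set.ofList (ks.map f)).length : Int)) 1 →
          d.contains (st.2.1 + 1) = false := by
        intro d hk
        rw [PySem.Dict.contains_eq_decide_mem_keys, hk, ih2]
        simp only [decide_eq_false_iff_not, PySem.List.mem_pyRange_one]
        omega
      have henum : PySem.List.enumerate (PySem.Set.ofList (ks.map f) ++ [f k]) 1
          = PySem.List.enumerate (PySem.Set.ofList (ks.map f)) 1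
            ++ [((1 + ((PySem.Set.ofList (ks.map f)).length : Int)), f k)] := by
        rw [PySem.List.enumerate_append]; simp [PySem.List.enumerate_cons]
      simp only [pvStepB, hcon', Bool.false_eq_true, ite_false]
      refine ⟨by rw [ih1, hadd], ?_, ?_, ?_⟩
      · rw [ih2, hlen]; push_cast; ring
      · rw [PySem.Dict.items_insert_of_not_contains _ _ (hfresh _ hkeys1), ih3, hadd, henum]
        simp [ih2]; omega
      · rw [PySem.Dict.items_insert_of_not_contains _ _ (hfresh _ hkeys2), ih4, hadd, henum]
        simp [ih2]; omega

-- ===== VERDICT (by name: the statement is the Claim_ definition above) =====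
theorem get_unique_combinations_and_list_with_dicts_spec : Claim_equal_get_unique_combinations_and_list_with_dicts := by
  intro R_p Entry_p _ _
  unfold Spec_get_unique_combinations_and_list_with_dicts
  simp only [get_unique_combinations_and_list_with_dicts, get_unique_combinations_and_list_with_dicts_alt]
  set dR := PySem.Dict.ofList R_p with hdR
  set dE := PySem.Dict.ofList Entry_p with hdE
  set f : Int → Int × Int := fun p => (dR.getD p 0, dE.getD p 0) with hf
  set combined := dR.keys.map f with hcombined
  set uc := (PySem.List.enumerate combined 1).foldl pvStepA PySem.Dict.empty with huc
  obtain ⟨hb1, hb2, hb3, hb4⟩ := pv_foldB f dR.keys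
  have hA : uc.keys = PySem.Set.ofList combined := by
    rw [huc, pv_keys_foldA, PySem.List.map_snd_enumerate]
    simp [PySem.Dict.empty, PySem.Dict.keys, PySem.Set.update_nil_left]
  have hsize : (uc.size : Int) = ((PySem.Set.ofList combined).length : Int) := by
    have h1 : uc.size = uc.items.length := rfl
    have h2 : uc.items.length = uc.keys.length := by
      conv_rhs => rw [show uc.keys = uc.items.map (·.1) from rfl]
      simp
    rw [h1, h2, hA]
  have hfa2 := pv_foldA2 uc.items 1 PySem.Dict.empty PySem.Dict.empty PySem.Dict.empty
      (fun j _ => PySem.Dict.contains_empty j) (fun j _ => PySem.Dict.contains_empty j)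
  have hbr1 : (PySem.List.enumerate uc.keys 1).map (fun p => (p.1, p.2.1))
      = (PySem.List.enumerate uc.items 1).map (fun ip => (ip.1, ip.2.1.1)) := by
    conv_lhs => rw [show uc.keys = uc.items.map (·.1) from rfl]
    rw [pv_enumerate_map, List.map_map]
    rfl
  have hbr2 : (PySem.List.enumerate uc.keys 1).map (fun p => (p.1, p.2.2))
      = (PySem.List.enumerate uc.items 1).map (fun ip => (ip.1, ip.2.1.2)) := by
    conv_lhs => rw [show uc.keys = uc.items.map (·.1) from rfl]
    rw [pv_enumerate_map, List.map_map]
    rfl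
  simp only [Prod.mk.injEq]
  refine ⟨?_, ?_, ?_⟩
  · rw [hb2, hsize]
  · rw [hfa2.1, hb3, ← hA, hbr1]
    simp [PySem.Dict.empty]
  · rw [hfa2.2, hb4, ← hA, hbr2]
    simp [PySem.Dict.empty]
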